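-- pv_equiv track=rewrite | github.com/neilberkman/tardigrade | scripts/cbmc_to_profile.py | _bytes_to_pre_boot_state
-- ===== SOURCE A (Python) =====
-- from typing import Any, Dict, Iterable, List, Optional, Sequence, Tuple
--
-- def _bytes_to_pre_boot_state(meta_base: int, bytes_map: Dict[int, int]) -> List[Dict[str, str]]:
--     word_indices = sorted({idx // 4 for idx in bytes_map.keys()})
--     writes: List[Dict[str, str]] = []
--     for word_idx in word_indices:
--         byte_offset = word_idx * 4
--         b0 = bytes_map.get(byte_offset + 0, 0)
--         b1 = bytes_map.get(byte_offset + 1, 0)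
--         b2 = bytes_map.get(byte_offset + 2, 0)
--         b3 = bytes_map.get(byte_offset + 3, 0)
--         word = (b0 << 0) | (b1 << 8) | (b2 << 16) | (b3 << 24)
--         writes.append(
--             {
--                 "address": "0x{:08X}".format(meta_base + byte_offset),
--                 "u32": "0x{:08X}".format(word),
--             }
--         )
--     return writes
-- ===== SOURCE B (Python) =====
-- from typing import Dict, List
--
--
-- def _bytes_to_pre_boot_state(meta_base: int, bytes_map: Dict[int, int]) -> List[Dict[str, str]]:
--     acc: Dict[int, int] = {}
--     for offset, value in bytes_map.items():
--         w = offset // 4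
--         acc[w] = acc.get(w, 0) | (value << (8 * (offset % 4)))
--     return [
--         {
--             "address": "0x{:08X}".format(meta_base + w * 4),
--             "u32": "0x{:08X}".format(acc[w]),
--         }
--         for w in sorted(acc)
--     ]
-- ===== Notes on version B (the rewrite author's own statement) =====
-- stated objective: alternative
-- what changed: B replaces A's sorted-set-of-word-indices plus four explicit dict lookups per word by a single aggregation pass that ORs each byte into a word-indexed accumulator dict (acc[off//4] |= byte << 8*(off%4)) and then formats the sorted accumulator.
import Mathlib
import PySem

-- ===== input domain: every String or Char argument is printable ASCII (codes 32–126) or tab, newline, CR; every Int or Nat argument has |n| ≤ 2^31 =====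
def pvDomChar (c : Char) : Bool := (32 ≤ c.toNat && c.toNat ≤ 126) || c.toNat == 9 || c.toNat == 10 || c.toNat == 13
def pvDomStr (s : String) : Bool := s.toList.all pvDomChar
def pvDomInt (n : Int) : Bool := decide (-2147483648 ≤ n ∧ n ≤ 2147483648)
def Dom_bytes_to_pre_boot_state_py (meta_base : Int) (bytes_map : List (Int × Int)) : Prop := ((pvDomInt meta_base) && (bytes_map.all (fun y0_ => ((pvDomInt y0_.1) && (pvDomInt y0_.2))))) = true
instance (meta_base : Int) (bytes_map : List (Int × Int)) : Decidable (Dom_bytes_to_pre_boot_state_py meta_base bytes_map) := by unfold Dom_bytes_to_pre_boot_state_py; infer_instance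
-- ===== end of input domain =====

-- B aggregates bytes into words in ONE pass over the items (acc[off//4] |= byte << 8*(off%4))
-- and then formats the sorted accumulator, instead of A's per-word four explicit dict lookups.
-- Equivalence is on the RETURN value; neither implementation mutates its arguments.

-- ===== PORT A =====
-- shared formatting helper: "0x{:08X}".format(n) (both Pythons call this same format)
def pvHexDigit (n : Nat) : Char := if n < 10 then Char.ofNat (48 + n) else Char.ofNat (55 + n)

def pvHexChars (n : Nat) : List Char :=
  if h : n < 16 then [pvHexDigit n]
  else pvHexChars (n / 16) ++ [pvHexDigit (n % 16)]
  decreasing_by exact Nat.div_lt_self (by omega) (by omega)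

def pvFmtHex8 (n : Int) : String :=
  "0x" ++ PySem.Str.zfill (String.ofList ((if n < 0 then ['-'] else []) ++ pvHexChars n.natAbs)) 8

def bytes_to_pre_boot_state_py (meta_base : Int) (bytes_map : List (Int × Int)) : List (List (String × String)) :=
  let word_indices := PySem.List.sorted
    (PySem.Set.ofList (bytes_map.map (fun p => PySem.Int.floordiv p.1 4))) (fun x => x) false
  word_indices.foldl (fun writes word_idx =>
    let byte_offset := word_idx * 4
    let b0 := PySem.Dict.getD (PySem.Dict.mk bytes_map) (byte_offset + 0) 0
    let b1 := PySem.Dict.getD (PySem.Dict.mk bytes_map) (byte_offset + 1) 0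
    let b2 := PySem.Dict.getD (PySem.Dict.mk bytes_map) (byte_offset + 2) 0
    let b3 := PySem.Dict.getD (PySem.Dict.mk bytes_map) (byte_offset + 3) 0
    let word := PySem.Int.bor (PySem.Int.bor (PySem.Int.bor (b0 <<< (0:Nat)) (b1 <<< (8:Nat))) (b2 <<< (16:Nat))) (b3 <<< (24:Nat))
    writes ++ [[("address", pvFmtHex8 (meta_base + byte_offset)), ("u32", pvFmtHex8 word)]]) []

-- ===== PORT B =====
def bytes_to_pre_boot_state_py_alt (meta_base : Int) (bytes_map : List (Int × Int)) : List (List (String × String)) :=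
  let acc := bytes_map.foldl (fun acc p =>
    acc.insert (PySem.Int.floordiv p.1 4)
      (PySem.Int.bor (acc.getD (PySem.Int.floordiv p.1 4) 0)
        (p.2 <<< (8 * (PySem.Int.mod p.1 4)).toNat))) PySem.Dict.empty
  (PySem.List.sorted acc.keys (fun x => x) false).map (fun w =>
    [("address", pvFmtHex8 (meta_base + w * 4)), ("u32", pvFmtHex8 (acc.getD w 0))])

-- ===== PRECONDITION & SPEC =====
-- Pre_ excludes association lists with a duplicated key: a Python dict cannot contain one, so
-- the behaviour of either program on such a list is an artefact of the list encoding
-- (A reads the first binding, B ORs all of them together).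
def Pre_bytes_to_pre_boot_state_py (meta_base : Int) (bytes_map : List (Int × Int)) : Prop :=
  (bytes_map.map Prod.fst).Nodup
instance (meta_base : Int) (bytes_map : List (Int × Int)) : Decidable (Pre_bytes_to_pre_boot_state_py meta_base bytes_map) := by unfold Pre_bytes_to_pre_boot_state_py; infer_instance

def pvWitness_bytes_to_pre_boot_state_py : Int × (List (Int × Int)) := (256, [(0, 17), (5, 2), (-3, 64)])

def Spec_bytes_to_pre_boot_state_py (meta_base : Int) (bytes_map : List (Int × Int)) (out : List (List (String × String))) : Prop := out = bytes_to_pre_boot_state_py_alt meta_base bytes_map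
instance (meta_base : Int) (bytes_map : List (Int × Int)) (out : List (List (String × String))) : Decidable (Spec_bytes_to_pre_boot_state_py meta_base bytes_map out) := by unfold Spec_bytes_to_pre_boot_state_py; infer_instance

-- ===== CLAIM (what is proved, stated in full; the proofs are below) =====
def Claim_equal_bytes_to_pre_boot_state_py : Prop := ∀ (meta_base : Int) (bytes_map : List (Int × Int)), Dom_bytes_to_pre_boot_state_py meta_base bytes_map → Pre_bytes_to_pre_boot_state_py meta_base bytes_map → Spec_bytes_to_pre_boot_state_py meta_base bytes_map (bytes_to_pre_boot_state_py meta_base bytes_map)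

-- ===== LEMMAS AND PROOFS =====

-- bitwise support: PySem.Int.bor is Mathlib's Int.lor, which is associative
theorem pv_sub_and_eq_ldiff (b : Nat) : ∀ a : Nat, b - (b &&& a) = Nat.ldiff b a := by
  induction b using Nat.binaryRec with
  | zero =>
    intro a
    apply Nat.eq_of_testBit_eq
    simp [Nat.testBit_ldiff]
  | bit xb n ih =>
    intro a
    cases a using Nat.bitCasesOn with
    | bit a0 a' =>
      rw [Nat.land_bit, Nat.ldiff_bit]
      have h1 : n &&& a' ≤ n := Nat.and_le_left
      have h2 := ih a'
      cases xb <;> cases a0 <;> simp [Nat.bit] <;> omega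

theorem pv_bor_eq_lor (a b : Int) : PySem.Int.bor a b = Int.lor a b := by
  unfold PySem.Int.bor
  rcases a with a | a <;> rcases b with b | b <;>
    simp [Int.lor, Int.negSucc_eq, pv_sub_and_eq_ldiff] <;> omega

theorem pv_lor_assoc (a b c : Int) : Int.lor (Int.lor a b) c = Int.lor a (Int.lor b c) := by
  rcases a with a | a <;> rcases b with b | b <;> rcases c with c | c <;>
    simp [Int.lor] <;>
    (apply Nat.eq_of_testBit_eq; intro i;
     simp [Nat.testBit_ldiff, Nat.testBit_or, Nat.testBit_and];
     cases a.testBit i <;> cases b.testBit i <;> cases c.testBit i <;> simp)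

theorem pv_bor_assoc (a b c : Int) :
    PySem.Int.bor (PySem.Int.bor a b) c = PySem.Int.bor a (PySem.Int.bor b c) := by
  simp [pv_bor_eq_lor, pv_lor_assoc]

theorem pv_bor_left_comm (a b c : Int) :
    PySem.Int.bor a (PySem.Int.bor b c) = PySem.Int.bor b (PySem.Int.bor a c) := by
  rw [← pv_bor_assoc, PySem.Int.bor_comm a b, pv_bor_assoc]

theorem pv_zero_bor (a : Int) : PySem.Int.bor 0 a = a := by
  rw [PySem.Int.bor_comm, PySem.Int.bor_zero]

-- folding appended singletons is a map
theorem pv_foldl_append_map {α β : Type} (g : α → β) :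
    ∀ (l : List α) (init : List β),
      l.foldl (fun acc x => acc ++ [g x]) init = init ++ l.map g := by
  intro l
  induction l with
  | nil => simp
  | cons x xs ih => intro init; simp [List.foldl_cons, ih]

-- first-match lookup in an appended association list
theorem pv_get?_mk_append (l : List (Int × Int)) (p : Int × Int) (k : Int) :
    (PySem.Dict.mk (l ++ [p])).get? k =
      ((PySem.Dict.mk l).get? k).or (if p.1 = k then some p.2 else none) := by
  induction l with
  | nil =>
    rw [List.nil_append, PySem.Dict.get?_mk_cons]
    have h0 : ({ items := [] } : PySem.Dict Int Int).get? k = none := by simp [PySem.Dict.get?]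
    rw [h0]
    by_cases h : p.1 = k <;> simp [h]
  | cons q rest ih =>
    rw [List.cons_append, PySem.Dict.get?_mk_cons, PySem.Dict.get?_mk_cons]
    by_cases hq : (q.1 == k) = true <;> simp [hq, ih]

theorem pv_get?_mk_eq_none (l : List (Int × Int)) (k : Int) (h : k ∉ l.map Prod.fst) :
    (PySem.Dict.mk l).get? k = none := by
  induction l with
  | nil => simp [PySem.Dict.get?]
  | cons q rest ih =>
    rw [PySem.Dict.get?_mk_cons]
    rw [List.map_cons] at h
    have h1 : ¬ (k = q.1) := fun hh => h (by simp [hh])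
    have h2 : k ∉ rest.map Prod.fst := fun hh => h (by simp [hh])
    have h3 : (q.1 == k) = false := beq_eq_false_iff_ne.2 (fun hh => h1 hh.symm)
    simp [h3, ih h2]

-- the accumulator one word at a time: B's fold value at w is A's four-lookup word
def pvStep (acc : PySem.Dict Int Int) (p : Int × Int) : PySem.Dict Int Int :=
  acc.insert (PySem.Int.floordiv p.1 4)
    (PySem.Int.bor (acc.getD (PySem.Int.floordiv p.1 4) 0)
      (p.2 <<< (8 * (PySem.Int.mod p.1 4)).toNat))

def pvWord (l : List (Int × Int)) (w : Int) : Int :=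
  PySem.Int.bor (PySem.Int.bor (PySem.Int.bor
    ((PySem.Dict.mk l).getD (w * 4 + 0) 0 <<< (0:Nat))
    ((PySem.Dict.mk l).getD (w * 4 + 1) 0 <<< (8:Nat)))
    ((PySem.Dict.mk l).getD (w * 4 + 2) 0 <<< (16:Nat)))
    ((PySem.Dict.mk l).getD (w * 4 + 3) 0 <<< (24:Nat))

theorem pv_fdiv_mod4 (a : Int) :
    PySem.Int.floordiv a 4 * 4 + PySem.Int.mod a 4 = a ∧
      0 ≤ PySem.Int.mod a 4 ∧ PySem.Int.mod a 4 < 4 :=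
  ⟨PySem.Int.floordiv_mul_add_mod a 4, PySem.Int.mod_nonneg a (by norm_num),
    PySem.Int.mod_lt a (by norm_num)⟩

theorem pv_getD_mk_append_ne (l : List (Int × Int)) (p : Int × Int) (k : Int) (h : k ≠ p.1) :
    (PySem.Dict.mk (l ++ [p])).getD k 0 = (PySem.Dict.mk l).getD k 0 := by
  rw [PySem.Dict.getD_eq_get?_getD, PySem.Dict.getD_eq_get?_getD, pv_get?_mk_append]
  rw [if_neg (fun hh => h hh.symm)]
  cases (PySem.Dict.mk l).get? k <;> simp

theorem pv_getD_mk_append_self (l : List (Int × Int)) (p : Int × Int)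
    (h : p.1 ∉ l.map Prod.fst) :
    (PySem.Dict.mk (l ++ [p])).getD p.1 0 = p.2 := by
  rw [PySem.Dict.getD_eq_get?_getD, pv_get?_mk_append, pv_get?_mk_eq_none l p.1 h]
  simp

theorem pv_getD_mk_not_mem (l : List (Int × Int)) (k : Int) (h : k ∉ l.map Prod.fst) :
    (PySem.Dict.mk l).getD k 0 = 0 := by
  rw [PySem.Dict.getD_eq_get?_getD, pv_get?_mk_eq_none l k h]
  rfl

theorem pv_acc_getD (l : List (Int × Int)) (h : (l.map Prod.fst).Nodup) (w : Int) :
    (l.foldl pvStep PySem.Dict.empty).getD w 0 = pvWord l w := by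
  induction l using List.reverseRecOn with
  | nil =>
    have h0 : ∀ k : Int, (PySem.Dict.mk ([] : List (Int × Int))).getD k 0 = 0 := by
      intro k; exact pv_getD_mk_not_mem [] k (by simp)
    simp only [List.foldl_nil, pvWord, h0]
    simp [PySem.Dict.getD_eq_get?_getD, PySem.Dict.get?, PySem.Dict.empty, PySem.Int.bor_zero]
  | append_singleton l p ih =>
    have hmap : ((l ++ [p]).map Prod.fst) = l.map Prod.fst ++ [p.1] := by simp
    rw [hmap] at h
    have hnd : (l.map Prod.fst).Nodup := (List.nodup_append.mp h).1
    have hfresh : p.1 ∉ l.map Prod.fst := by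
      intro hm
      have := (List.nodup_append.mp h).2.2
      exact absurd (by simp : p.1 ∈ [p.1]) (by simpa using this p.1 hm)
    obtain ⟨heq, hr0, hr4⟩ := pv_fdiv_mod4 p.1
    rw [List.foldl_append, List.foldl_cons, List.foldl_nil]
    by_cases hw : w = PySem.Int.floordiv p.1 4
    · -- the appended byte lands in word w
      subst hw
      have hstep : ∀ d : PySem.Dict Int Int,
          (pvStep d p).getD (PySem.Int.floordiv p.1 4) 0
            = PySem.Int.bor (d.getD (PySem.Int.floordiv p.1 4) 0)
                (p.2 <<< (8 * (PySem.Int.mod p.1 4)).toNat) := by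
        intro d; unfold pvStep; rw [PySem.Dict.getD_insert, if_pos rfl]
      rw [hstep, ih hnd]
      have hcases : PySem.Int.mod p.1 4 = 0 ∨ PySem.Int.mod p.1 4 = 1 ∨
          PySem.Int.mod p.1 4 = 2 ∨ PySem.Int.mod p.1 4 = 3 := by omega
      rcases hcases with hrv | hrv | hrv | hrv
      · have hP : p.1 = PySem.Int.floordiv p.1 4 * 4 + 0 := by omega
        have sSelf : (PySem.Dict.mk (l ++ [p])).getD (PySem.Int.floordiv p.1 4 * 4 + 0) 0 = p.2 := by
          rw [← hP]; exact pv_getD_mk_append_self l p hfresh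
        have zSelf : (PySem.Dict.mk l).getD (PySem.Int.floordiv p.1 4 * 4 + 0) 0 = 0 := by
          rw [← hP]; exact pv_getD_mk_not_mem l p.1 hfresh
        have s1 : (PySem.Dict.mk (l ++ [p])).getD (PySem.Int.floordiv p.1 4 * 4 + 1) 0
            = (PySem.Dict.mk l).getD (PySem.Int.floordiv p.1 4 * 4 + 1) 0 :=
          pv_getD_mk_append_ne l p _ (by omega)
        have s2 : (PySem.Dict.mk (l ++ [p])).getD (PySem.Int.floordiv p.1 4 * 4 + 2) 0
            = (PySem.Dict.mk l).getD (PySem.Int.floordiv p.1 4 * 4 + 2) 0 :=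
          pv_getD_mk_append_ne l p _ (by omega)
        have s3 : (PySem.Dict.mk (l ++ [p])).getD (PySem.Int.floordiv p.1 4 * 4 + 3) 0
            = (PySem.Dict.mk l).getD (PySem.Int.floordiv p.1 4 * 4 + 3) 0 :=
          pv_getD_mk_append_ne l p _ (by omega)
        unfold pvWord
        rw [sSelf, zSelf, s1, s2, s3, hrv]
        norm_num [Int.zero_shiftLeft, Int.shiftLeft_zero]
        simp [Int.shiftLeft_zero, pv_bor_assoc, pv_bor_left_comm, PySem.Int.bor_comm, PySem.Int.bor_zero, pv_zero_bor]
      · have hP : p.1 = PySem.Int.floordiv p.1 4 * 4 + 1 := by omega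
        have sSelf : (PySem.Dict.mk (l ++ [p])).getD (PySem.Int.floordiv p.1 4 * 4 + 1) 0 = p.2 := by
          rw [← hP]; exact pv_getD_mk_append_self l p hfresh
        have zSelf : (PySem.Dict.mk l).getD (PySem.Int.floordiv p.1 4 * 4 + 1) 0 = 0 := by
          rw [← hP]; exact pv_getD_mk_not_mem l p.1 hfresh
        have s0 : (PySem.Dict.mk (l ++ [p])).getD (PySem.Int.floordiv p.1 4 * 4 + 0) 0
            = (PySem.Dict.mk l).getD (PySem.Int.floordiv p.1 4 * 4 + 0) 0 :=
          pv_getD_mk_append_ne l p _ (by omega)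
        have s2 : (PySem.Dict.mk (l ++ [p])).getD (PySem.Int.floordiv p.1 4 * 4 + 2) 0
            = (PySem.Dict.mk l).getD (PySem.Int.floordiv p.1 4 * 4 + 2) 0 :=
          pv_getD_mk_append_ne l p _ (by omega)
        have s3 : (PySem.Dict.mk (l ++ [p])).getD (PySem.Int.floordiv p.1 4 * 4 + 3) 0
            = (PySem.Dict.mk l).getD (PySem.Int.floordiv p.1 4 * 4 + 3) 0 :=
          pv_getD_mk_append_ne l p _ (by omega)
        unfold pvWord
        rw [sSelf, zSelf, s0, s2, s3, hrv]
        norm_num [Int.zero_shiftLeft, Int.shiftLeft_zero]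
        simp [Int.shiftLeft_zero, pv_bor_assoc, pv_bor_left_comm, PySem.Int.bor_comm, PySem.Int.bor_zero, pv_zero_bor]
      · have hP : p.1 = PySem.Int.floordiv p.1 4 * 4 + 2 := by omega
        have sSelf : (PySem.Dict.mk (l ++ [p])).getD (PySem.Int.floordiv p.1 4 * 4 + 2) 0 = p.2 := by
          rw [← hP]; exact pv_getD_mk_append_self l p hfresh
        have zSelf : (PySem.Dict.mk l).getD (PySem.Int.floordiv p.1 4 * 4 + 2) 0 = 0 := by
          rw [← hP]; exact pv_getD_mk_not_mem l p.1 hfresh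
        have s0 : (PySem.Dict.mk (l ++ [p])).getD (PySem.Int.floordiv p.1 4 * 4 + 0) 0
            = (PySem.Dict.mk l).getD (PySem.Int.floordiv p.1 4 * 4 + 0) 0 :=
          pv_getD_mk_append_ne l p _ (by omega)
        have s1 : (PySem.Dict.mk (l ++ [p])).getD (PySem.Int.floordiv p.1 4 * 4 + 1) 0
            = (PySem.Dict.mk l).getD (PySem.Int.floordiv p.1 4 * 4 + 1) 0 :=
          pv_getD_mk_append_ne l p _ (by omega)
        have s3 : (PySem.Dict.mk (l ++ [p])).getD (PySem.Int.floordiv p.1 4 * 4 + 3) 0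
            = (PySem.Dict.mk l).getD (PySem.Int.floordiv p.1 4 * 4 + 3) 0 :=
          pv_getD_mk_append_ne l p _ (by omega)
        unfold pvWord
        rw [sSelf, zSelf, s0, s1, s3, hrv]
        norm_num [Int.zero_shiftLeft, Int.shiftLeft_zero]
        simp [Int.shiftLeft_zero, pv_bor_assoc, pv_bor_left_comm, PySem.Int.bor_comm, PySem.Int.bor_zero, pv_zero_bor]
      · have hP : p.1 = PySem.Int.floordiv p.1 4 * 4 + 3 := by omega
        have sSelf : (PySem.Dict.mk (l ++ [p])).getD (PySem.Int.floordiv p.1 4 * 4 + 3) 0 = p.2 := by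
          rw [← hP]; exact pv_getD_mk_append_self l p hfresh
        have zSelf : (PySem.Dict.mk l).getD (PySem.Int.floordiv p.1 4 * 4 + 3) 0 = 0 := by
          rw [← hP]; exact pv_getD_mk_not_mem l p.1 hfresh
        have s0 : (PySem.Dict.mk (l ++ [p])).getD (PySem.Int.floordiv p.1 4 * 4 + 0) 0
            = (PySem.Dict.mk l).getD (PySem.Int.floordiv p.1 4 * 4 + 0) 0 :=
          pv_getD_mk_append_ne l p _ (by omega)
        have s1 : (PySem.Dict.mk (l ++ [p])).getD (PySem.Int.floordiv p.1 4 * 4 + 1) 0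
            = (PySem.Dict.mk l).getD (PySem.Int.floordiv p.1 4 * 4 + 1) 0 :=
          pv_getD_mk_append_ne l p _ (by omega)
        have s2 : (PySem.Dict.mk (l ++ [p])).getD (PySem.Int.floordiv p.1 4 * 4 + 2) 0
            = (PySem.Dict.mk l).getD (PySem.Int.floordiv p.1 4 * 4 + 2) 0 :=
          pv_getD_mk_append_ne l p _ (by omega)
        unfold pvWord
        rw [sSelf, zSelf, s0, s1, s2, hrv]
        norm_num [Int.zero_shiftLeft, Int.shiftLeft_zero]
        simp [Int.shiftLeft_zero, pv_bor_assoc, pv_bor_left_comm, PySem.Int.bor_comm, PySem.Int.bor_zero, pv_zero_bor]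
    · -- a different word: both sides unchanged
      have hstep : (pvStep (l.foldl pvStep PySem.Dict.empty) p).getD w 0
          = (l.foldl pvStep PySem.Dict.empty).getD w 0 := by
        unfold pvStep
        rw [PySem.Dict.getD_insert]
        exact if_neg hw
      have hslots : ∀ k : Int, 0 ≤ k → k < 4 →
          (PySem.Dict.mk (l ++ [p])).getD (w * 4 + k) 0 = (PySem.Dict.mk l).getD (w * 4 + k) 0 := by
        intro k hk0 hk4
        refine pv_getD_mk_append_ne l p _ (fun hc => hw ?_)
        omega
      show (pvStep (l.foldl pvStep PySem.Dict.empty) p).getD w 0 = pvWord (l ++ [p]) w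
      rw [hstep, ih hnd]
      unfold pvWord
      rw [hslots 0 (by omega) (by omega), hslots 1 (by omega) (by omega),
          hslots 2 (by omega) (by omega), hslots 3 (by omega) (by omega)]

-- ===== VERDICT (by name: the statement is the Claim_ definition above) =====
theorem bytes_to_pre_boot_state_py_spec : Claim_equal_bytes_to_pre_boot_state_py := by
  intro mb bm _hdom hpre
  unfold Spec_bytes_to_pre_boot_state_py bytes_to_pre_boot_state_py bytes_to_pre_boot_state_py_alt
  have h1 : (bm.foldl pvStep (PySem.Dict.empty : PySem.Dict Int Int)).keys
      = PySem.Set.ofList (bm.map (fun p => PySem.Int.floordiv p.1 4)) := by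
    have h2 := PySem.Dict.keys_foldl_insert_key (ν := Int) bm
      (fun p => PySem.Int.floordiv p.1 4)
      (fun d p => PySem.Int.bor (d.getD (PySem.Int.floordiv p.1 4) 0)
        (p.2 <<< (8 * (PySem.Int.mod p.1 4)).toNat)) PySem.Dict.empty
    rw [show (PySem.Dict.empty : PySem.Dict Int Int).keys = [] from rfl,
        PySem.Set.update_nil_left] at h2
    exact h2
  show List.foldl (fun writes word_idx => writes ++
      [[("address", pvFmtHex8 (mb + word_idx * 4)), ("u32", pvFmtHex8 (pvWord bm word_idx))]]) []
      (PySem.List.sorted (PySem.Set.ofList (bm.map (fun p => PySem.Int.floordiv p.1 4))) (fun x => x) false)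
    = (PySem.List.sorted (bm.foldl pvStep PySem.Dict.empty).keys (fun x => x) false).map (fun w =>
      [("address", pvFmtHex8 (mb + w * 4)), ("u32", pvFmtHex8 ((bm.foldl pvStep PySem.Dict.empty).getD w 0))])
  rw [h1, pv_foldl_append_map, List.nil_append]
  refine List.map_congr_left (fun w _hw => ?_)
  rw [pv_acc_getD bm hpre w]
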